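-- pv_equiv track=rewrite | github.com/btrkeks/transcoda | src/grammar/interpretation_transition_rule.py | _classify_closed_line
-- ===== SOURCE A (Python) =====
-- from dataclasses import dataclass, field
-- from typing import Literal
--
-- ClosedLineType = Literal["data", "bar", "interp", "spine_op", "unknown"]
--
-- _SPINE_OP_FIELDS = {"*", "*^", "*v"}
--
-- def _classify_closed_line(fields: tuple[str, ...]) -> ClosedLineType:
--     if not fields:
--         return "unknown"
--     if all(field in _SPINE_OP_FIELDS for field in fields):
--         return "spine_op"
--     if all(field == "*-" for field in fields):
--         return "unknown"
--     if all(field.startswith("*") for field in fields):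
--         return "interp"
--     if all(field.startswith("=") for field in fields):
--         return "bar"
--     if any(field.startswith("*") or field.startswith("=") for field in fields):
--         return "unknown"
--     return "data"
-- ===== SOURCE B (Python) =====
-- _SPINE_OP_FIELDS = {"*", "*^", "*v"}
--
-- def _classify_closed_line(fields):
--     if not fields:
--         return "unknown"
--     all_spine = all_dash = all_star = all_eq = True
--     any_special = False
--     for f in fields:
--         is_star = f.startswith("*")
--         is_eq = f.startswith("=")
--         all_spine = all_spine and f in _SPINE_OP_FIELDS
--         all_dash = all_dash and f == "*-"
--         all_star = all_star and is_star
--         all_eq = all_eq and is_eq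
--         any_special = any_special or is_star or is_eq
--     if all_spine:
--         return "spine_op"
--     if all_dash:
--         return "unknown"
--     if all_star:
--         return "interp"
--     if all_eq:
--         return "bar"
--     if any_special:
--         return "unknown"
--     return "data"
-- ===== Notes on version B (the rewrite author's own statement) =====
-- stated objective: alternative
-- what changed: Replaces five separate all()/any() scans over the fields with a single pass that accumulates five boolean flags, then decides the class from the flags in the same branch order.
import Mathlib
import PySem

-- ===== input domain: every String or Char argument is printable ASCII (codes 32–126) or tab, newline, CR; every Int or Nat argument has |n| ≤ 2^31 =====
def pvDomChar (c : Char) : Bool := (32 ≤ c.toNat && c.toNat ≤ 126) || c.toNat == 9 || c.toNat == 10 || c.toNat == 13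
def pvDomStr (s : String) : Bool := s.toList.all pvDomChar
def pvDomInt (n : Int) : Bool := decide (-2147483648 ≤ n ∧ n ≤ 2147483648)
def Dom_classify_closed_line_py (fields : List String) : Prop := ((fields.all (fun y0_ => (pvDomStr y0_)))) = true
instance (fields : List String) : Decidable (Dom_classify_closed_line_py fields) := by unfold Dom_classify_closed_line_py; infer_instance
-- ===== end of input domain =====

-- B replaces A's five separate all()/any() scans by one accumulation pass over the fields (objective: alternative decomposition, same outcomes).

-- ===== PORT A =====
def pvSpineOpFields : PySem.Set String := PySem.Set.ofList ["*", "*^", "*v"]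

def classify_closed_line_py (fields : List String) : String :=
  if fields = [] then "unknown"
  else if fields.all (fun f => pvSpineOpFields.contains f) then "spine_op"
  else if fields.all (fun f => f == "*-") then "unknown"
  else if fields.all (fun f => PySem.Str.startswith f "*") then "interp"
  else if fields.all (fun f => PySem.Str.startswith f "=") then "bar"
  else if fields.any (fun f => PySem.Str.startswith f "*" || PySem.Str.startswith f "=") then "unknown"
  else "data"

-- ===== PORT B =====
def pvStep (acc : Bool × Bool × Bool × Bool × Bool) (f : String) : Bool × Bool × Bool × Bool × Bool :=
  let is_star := PySem.Str.startswith f "*"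
  let is_eq := PySem.Str.startswith f "="
  (acc.1 && pvSpineOpFields.contains f,
   acc.2.1 && (f == "*-"),
   acc.2.2.1 && is_star,
   acc.2.2.2.1 && is_eq,
   acc.2.2.2.2 || is_star || is_eq)

def classify_closed_line_py_alt (fields : List String) : String :=
  if fields = [] then "unknown"
  else
    let flags := fields.foldl pvStep (true, true, true, true, false)
    if flags.1 then "spine_op"
    else if flags.2.1 then "unknown"
    else if flags.2.2.1 then "interp"
    else if flags.2.2.2.1 then "bar"
    else if flags.2.2.2.2 then "unknown"
    else "data"

-- ===== PRECONDITION & SPEC =====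
def Spec_classify_closed_line_py (fields : List String) (out : String) : Prop := out = classify_closed_line_py_alt fields
instance (fields : List String) (out : String) : Decidable (Spec_classify_closed_line_py fields out) := by unfold Spec_classify_closed_line_py; infer_instance

-- ===== CLAIM (what is proved, stated in full; the proofs are below) =====
def Claim_equal_classify_closed_line_py : Prop := ∀ (fields : List String), Dom_classify_closed_line_py fields → Spec_classify_closed_line_py fields (classify_closed_line_py fields)

-- ===== LEMMAS AND PROOFS =====

/-- The single fold of B computes exactly the five scans of A. -/
lemma pvStep_foldl (fields : List String) (s d st e sp : Bool) :
    fields.foldl pvStep (s, d, st, e, sp) =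
      (s && fields.all (fun f => pvSpineOpFields.contains f),
       d && fields.all (fun f => f == "*-"),
       st && fields.all (fun f => PySem.Str.startswith f "*"),
       e && fields.all (fun f => PySem.Str.startswith f "="),
       sp || fields.any (fun f => PySem.Str.startswith f "*" || PySem.Str.startswith f "=")) := by
  induction fields generalizing s d st e sp with
  | nil => simp
  | cons x xs ih =>
    simp only [List.foldl_cons, List.all_cons, List.any_cons, pvStep, ih, Bool.and_assoc, Bool.or_assoc]

-- ===== VERDICT (by name: the statement is the Claim_ definition above) =====
theorem classify_closed_line_py_spec : Claim_equal_classify_closed_line_py := by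
  intro fields _
  unfold Spec_classify_closed_line_py classify_closed_line_py classify_closed_line_py_alt
  by_cases h : fields = []
  · simp [h]
  · simp only [h, pvStep_foldl, Bool.true_and, Bool.false_or]
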